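-- pv_equiv track=rewrite | github.com/albanducos87/interface | app.py | makeCategories
-- ===== SOURCE A (Python) =====
-- def makeCategories(array_devices):
--     listCat = []
--     listCat.append(array_devices[0][0:2])
--     cpt = 0
--     for d in array_devices:
--         if (d[0:2] != listCat[cpt]):
--             listCat.append(d[0:2])
--             cpt += 1
--     return listCat
-- ===== SOURCE B (Python) =====
-- def makeCategories(array_devices):
--     result = []
--     i = 0
--     n = len(array_devices)
--     while i < n:
--         key = array_devices[i][0:2]
--         result.append(key)
--         j = i + 1
--         while j < n and array_devices[j][0:2] == key:
--             j += 1
--         i = j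
--     return result
-- ===== Notes on version B (the rewrite author's own statement) =====
-- stated objective: alternative
-- what changed: Replaces A's per-element loop that compares each prefix against a cursor into the growing output by a run-skipping group-by: an outer loop takes each run's key and an inner scan advances the index past the whole run, so the output list is never consulted.
import Mathlib
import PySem

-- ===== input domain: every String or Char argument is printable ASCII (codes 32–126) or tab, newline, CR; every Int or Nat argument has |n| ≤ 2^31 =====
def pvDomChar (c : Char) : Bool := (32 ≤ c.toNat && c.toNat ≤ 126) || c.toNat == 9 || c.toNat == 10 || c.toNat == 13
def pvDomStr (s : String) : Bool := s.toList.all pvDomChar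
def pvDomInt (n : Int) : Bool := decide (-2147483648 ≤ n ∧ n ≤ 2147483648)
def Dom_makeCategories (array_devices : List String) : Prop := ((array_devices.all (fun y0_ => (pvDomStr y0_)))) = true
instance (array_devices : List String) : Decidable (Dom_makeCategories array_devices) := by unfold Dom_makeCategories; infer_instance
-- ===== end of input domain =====

-- B replaces A's per-element loop (comparing each prefix with a cursor into the growing output)
-- by a run-skipping group-by: outer loop per run, inner scan past the run; same cost ("alternative").

-- ===== PORT A =====
-- d[0:2]
def pvPref (d : String) : String := PySem.Str.slice d (some 0) (some 2)

-- one iteration of A's for-loop: state is (listCat, cpt)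
def pvStepA (st : List String × Int) (d : String) : List String × Int :=
  if pvPref d ≠ (PySem.List.pyGet? st.1 st.2).getD "" then
    (st.1 ++ [pvPref d], st.2 + 1)
  else st

def makeCategories (array_devices : List String) : List String :=
  match PySem.List.pyGet? array_devices 0 with
  | none => []   -- array_devices[0] raises IndexError: excluded by Pre_
  | some d0 =>
    (array_devices.foldl pvStepA ([pvPref d0], 0)).1

-- ===== PORT B =====
-- inner while loop: 'while j < n and array_devices[j][0:2] == key: j += 1'
-- (devs.getD j "" is exact here: the guard j < n keeps the access in range)
def pvInner (devs : List String) (n : Nat) (key : String) (j : Nat) : Nat :=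
  if j < n ∧ pvPref (devs.getD j "") = key then pvInner devs n key (j + 1) else j
termination_by n - j
decreasing_by omega

-- termination measure for the outer loop: the inner scan never moves backwards
theorem pvInner_ge (devs : List String) (n : Nat) (key : String) (j : Nat) :
    j ≤ pvInner devs n key j := by
  fun_induction pvInner with
  | case1 j h ih => omega
  | case2 j h => omega

-- outer while loop: 'while i < n: key = …; result.append(key); j = i+1; <inner>; i = j'
def pvOuter (devs : List String) (n : Nat) (i : Nat) (acc : List String) : List String :=
  if i < n then
    let key := pvPref (devs.getD i "")
    pvOuter devs n (pvInner devs n key (i + 1)) (acc ++ [key])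
  else acc
termination_by n - i
decreasing_by
  have := pvInner_ge devs n (pvPref (devs.getD i "")) (i + 1)
  omega

def makeCategories_alt (array_devices : List String) : List String :=
  pvOuter array_devices array_devices.length 0 []

-- ===== PRECONDITION & SPEC =====
-- A raises IndexError on the empty list (array_devices[0]); every other input is admitted.
def Pre_makeCategories (array_devices : List String) : Prop := array_devices ≠ []
instance (array_devices : List String) : Decidable (Pre_makeCategories array_devices) := by unfold Pre_makeCategories; infer_instance
def pvWitness_makeCategories : List String := ["ab1", "ab2", "cd3"]

def Spec_makeCategories (array_devices : List String) (out : List String) : Prop := out = makeCategories_alt array_devices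
instance (array_devices : List String) (out : List String) : Decidable (Spec_makeCategories array_devices out) := by unfold Spec_makeCategories; infer_instance

-- ===== CLAIM (what is proved, stated in full; the proofs are below) =====
def Claim_equal_makeCategories : Prop := ∀ (array_devices : List String), Dom_makeCategories array_devices → Pre_makeCategories array_devices → Spec_makeCategories array_devices (makeCategories array_devices)

-- ===== LEMMAS AND PROOFS =====

-- common characterisation: collapse consecutive duplicates of ps, given the previous prefix p
def pvCollapse (p : String) (ps : List String) : List String :=
  match ps with
  | [] => []
  | q :: qs => (if q ≠ p then [q] else []) ++ pvCollapse q qs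

theorem pvStepA_fold (ds : List String) : ∀ (ys : List String) (p : String),
    (ds.foldl pvStepA (ys ++ [p], (ys.length : Int))).1
      = (ys ++ [p]) ++ pvCollapse p (ds.map pvPref) := by
  induction ds with
  | nil => intro ys p; simp [pvCollapse]
  | cons d ds ih =>
    intro ys p
    have hget : PySem.List.pyGet? (ys ++ [p]) (ys.length : Int) = some p := by
      rw [PySem.List.pyGet?_natCast]; simp
    by_cases h : pvPref d = p
    · simp only [List.foldl_cons, pvStepA, hget, Option.getD_some, h, ne_eq,
        not_true_eq_false, if_false, ih, List.map_cons, pvCollapse]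
      simp
    · have hlen : ((ys ++ [p]).length : Int) = (ys.length : Int) + 1 := by simp
      simp only [List.foldl_cons, pvStepA, hget, Option.getD_some, ne_eq, h,
        not_false_eq_true, if_true]
      rw [← hlen]
      have := ih (ys ++ [p]) (pvPref d)
      simp only [List.append_assoc] at this ⊢
      rw [this]
      simp [pvCollapse, h]

-- list-level reading of B's run-skipping loop
def pvG (ds : List String) : List String :=
  match ds with
  | [] => []
  | d :: ds' => pvPref d :: pvG (ds'.dropWhile (fun x => pvPref x = pvPref d))
termination_by ds.length
decreasing_by
  have := List.length_dropWhile_le (fun x => pvPref x = pvPref d) ds'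
  simp at *; omega

theorem pvCollapse_eq_pvG (ds : List String) : ∀ (p : String),
    pvCollapse p (ds.map pvPref) = pvG (ds.dropWhile (fun x => pvPref x = p)) := by
  induction ds with
  | nil => intro p; simp [pvCollapse, pvG]
  | cons d ds ih =>
    intro p
    by_cases h : pvPref d = p
    · simp [pvCollapse, h, ih]
    · simp only [List.map_cons, pvCollapse, List.dropWhile_cons]
      simp [h, pvG, ih]

-- l = takeWhile ++ dropWhile, packaged as the two facts the proofs below need
theorem pvSplit_len (p : String → Bool) (l : List String) :
    (l.takeWhile p).length ≤ l.length := by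
  induction l with
  | nil => simp
  | cons a t ih => by_cases h : p a <;> simp [h] <;> omega

theorem pvSplit_drop (p : String → Bool) (l : List String) :
    l.drop (l.takeWhile p).length = l.dropWhile p := by
  induction l with
  | nil => simp
  | cons a t ih => by_cases h : p a <;> simp [h, ih]

theorem pvInner_spec (devs : List String) (key : String) : ∀ (k j : Nat),
    j ≤ devs.length → devs.length - j ≤ k →
    pvInner devs devs.length key j
      = j + ((devs.drop j).takeWhile (fun x => pvPref x = key)).length := by
  intro k
  induction k with
  | zero =>
    intro j hj hk
    rw [pvInner, if_neg (by omega)]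
    have : devs.drop j = [] := List.drop_eq_nil_of_le (by omega)
    simp [this]
  | succ k ih =>
    intro j hj hk
    rw [pvInner]
    by_cases hlt : j < devs.length
    · have hdrop : devs.drop j = devs[j] :: devs.drop (j + 1) :=
        List.drop_eq_getElem_cons hlt
      have hgd : devs.getD j "" = devs[j] := by
        simp [List.getD, List.getElem?_eq_getElem hlt]
      by_cases hk : pvPref devs[j] = key
      · rw [if_pos ⟨hlt, by rw [hgd]; exact hk⟩]
        rw [ih (j + 1) (by omega) (by omega)]
        rw [hdrop, List.takeWhile_cons, if_pos (by simp [hk])]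
        simp; omega
      · rw [if_neg (by rw [hgd]; tauto)]
        rw [hdrop, List.takeWhile_cons, if_neg (by simp [hk])]
        simp
    · rw [if_neg (by tauto)]
      have : devs.drop j = [] := List.drop_eq_nil_of_le (by omega)
      simp [this]

theorem pvOuter_spec (devs : List String) : ∀ (k i : Nat) (acc : List String),
    i ≤ devs.length → devs.length - i ≤ k →
    pvOuter devs devs.length i acc = acc ++ pvG (devs.drop i) := by
  intro k
  induction k with
  | zero =>
    intro i acc hi hk
    rw [pvOuter, if_neg (by omega)]
    have : devs.drop i = [] := List.drop_eq_nil_of_le (by omega)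
    simp [this, pvG]
  | succ k ih =>
    intro i acc hi hk
    rw [pvOuter]
    by_cases hlt : i < devs.length
    · rw [if_pos hlt]
      have hdrop : devs.drop i = devs[i] :: devs.drop (i + 1) :=
        List.drop_eq_getElem_cons hlt
      have hgd : devs[i]?.getD "" = devs[i] := by
        simp [List.getElem?_eq_getElem hlt]
      set key := pvPref (devs.getD i "") with hkey
      have hinner := pvInner_spec devs key (devs.length - (i + 1)) (i + 1) (by omega) (by omega)
      have htw : ((devs.drop (i + 1)).takeWhile (fun x => pvPref x = key)).length
          ≤ (devs.drop (i + 1)).length := pvSplit_len _ _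
      have hlen1 : (devs.drop (i + 1)).length = devs.length - (i + 1) := by simp
      have hj : pvInner devs devs.length key (i + 1) ≤ devs.length := by omega
      rw [ih _ _ hj (by omega)]
      have hdj : devs.drop (pvInner devs devs.length key (i + 1))
          = (devs.drop (i + 1)).dropWhile (fun x => pvPref x = key) := by
        rw [hinner, ← List.drop_drop]
        exact pvSplit_drop _ _
      rw [hdj, hdrop]
      conv_rhs => rw [pvG]
      simp [hkey, List.getD, hgd]
    · rw [if_neg hlt]
      have : devs.drop i = [] := List.drop_eq_nil_of_le (by omega)
      simp [this, pvG]

-- ===== VERDICT (by name: the statement is the Claim_ definition above) =====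
theorem makeCategories_spec : Claim_equal_makeCategories := by
  intro xs _ hpre
  unfold Spec_makeCategories makeCategories makeCategories_alt
  obtain ⟨d, ds, rfl⟩ := List.exists_cons_of_ne_nil hpre
  rw [show PySem.List.pyGet? (d :: ds) 0 = some d from by
        rw [show (0 : Int) = ((0 : Nat) : Int) from rfl, PySem.List.pyGet?_natCast]; simp]
  dsimp only
  rw [pvOuter_spec (d :: ds) (d :: ds).length 0 [] (by omega) (by omega)]
  rw [List.foldl_cons]
  have hstep : pvStepA ([pvPref d], 0) d = ([pvPref d], 0) := by
    simp [pvStepA, PySem.List.pyGet?, PySem.List.pyIdx?]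
  rw [hstep, show ((0 : Int) = (([] : List String).length : Int)) from rfl,
      show ([pvPref d] : List String) = [] ++ [pvPref d] from rfl, pvStepA_fold]
  simp [pvG, pvCollapse_eq_pvG]
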